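-- pv_equiv track=rewrite | github.com/horeilly1101/fermat | rsa/encryption_device.py | convert_message_to_matrix
-- ===== SOURCE A (Python) =====
-- def convert_message_to_matrix(message):
--     matrices: list = []
--     for i, char in enumerate(message):
--         matrix_num, position = divmod(i, 16)
--
--         if position == 0:
--             matrices.append(
--                 [[32 for _ in range(4)] for _ in range(4)]
--             )
--
--         j, i = divmod(position, 4)
--         matrices[matrix_num][i][j] = ord(char)
--     return matrices
-- ===== SOURCE B (Python) =====
-- def convert_message_to_matrix(message):
--     n = (len(message) + 15) // 16
--     return [
--         [
--             [ord(message[m * 16 + j * 4 + i]) if m * 16 + j * 4 + i < len(message) else 32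
--              for j in range(4)]
--             for i in range(4)
--         ]
--         for m in range(n)
--     ]
-- ===== Notes on version B (the rewrite author's own statement) =====
-- stated objective: alternative
-- what changed: Replaces the scatter (enumerate chars, append fresh 32-filled matrices, write each char into its cell) by a gather: compute the matrix count up front and build every output cell directly from its source index m*16+j*4+i, defaulting to 32 past the end.
import Mathlib
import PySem

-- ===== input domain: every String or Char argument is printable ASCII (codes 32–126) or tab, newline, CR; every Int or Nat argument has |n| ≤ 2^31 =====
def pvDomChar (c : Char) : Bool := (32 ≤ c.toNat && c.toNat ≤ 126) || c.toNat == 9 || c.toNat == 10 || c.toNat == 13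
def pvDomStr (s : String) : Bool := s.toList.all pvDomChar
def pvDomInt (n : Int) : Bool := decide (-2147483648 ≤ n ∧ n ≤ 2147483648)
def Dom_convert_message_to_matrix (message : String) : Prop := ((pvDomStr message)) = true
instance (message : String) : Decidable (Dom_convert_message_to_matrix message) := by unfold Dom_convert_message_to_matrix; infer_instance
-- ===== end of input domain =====

-- B builds the output by gathering each cell from its source index, instead of A's
-- scatter (append fresh 32-matrices while enumerating the chars, write each into place).

-- ===== PORT A =====
-- loop body of A's 'for i, char in enumerate(message)'
def cmtmStep (matrices : List (List (List Int))) (p : Int × Char) : List (List (List Int)) :=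
  let i := p.1
  let char := p.2
  let matrix_num := PySem.Int.floordiv i 16
  let position := PySem.Int.mod i 16
  let matrices :=
    if position == 0 then
      matrices ++ [(PySem.List.pyRange 0 4 1).map (fun _ => (PySem.List.pyRange 0 4 1).map (fun _ => (32 : Int)))]
    else matrices
  let j := PySem.Int.floordiv position 4
  let i' := PySem.Int.mod position 4
  -- matrices[matrix_num][i'][j] = ord(char)
  PySem.List.pySetD matrices matrix_num
    (PySem.List.pySetD (PySem.List.pyGetD matrices matrix_num []) i'
      (PySem.List.pySetD (PySem.List.pyGetD (PySem.List.pyGetD matrices matrix_num []) i' []) j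
        ((char.toNat : Int))))

def convert_message_to_matrix (message : String) : List (List (List Int)) :=
  (PySem.List.enumerate message.toList 0).foldl cmtmStep []

-- ===== PORT B =====
def convert_message_to_matrix_alt (message : String) : List (List (List Int)) :=
  let l := message.toList
  let n := (l.length + 15) / 16
  (List.range n).map (fun m =>
    (List.range 4).map (fun i =>
      (List.range 4).map (fun j =>
        if h : m * 16 + j * 4 + i < l.length then ((l[m * 16 + j * 4 + i]).toNat : Int) else 32)))

-- ===== PRECONDITION & SPEC =====
def Spec_convert_message_to_matrix (message : String) (out : List (List (List Int))) : Prop := out = convert_message_to_matrix_alt message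
instance (message : String) (out : List (List (List Int))) : Decidable (Spec_convert_message_to_matrix message out) := by unfold Spec_convert_message_to_matrix; infer_instance

-- ===== CLAIM (what is proved, stated in full; the proofs are below) =====
def Claim_equal_convert_message_to_matrix : Prop := ∀ (message : String), Dom_convert_message_to_matrix message → Spec_convert_message_to_matrix message (convert_message_to_matrix message)

-- ===== LEMMAS AND PROOFS =====

-- A's state after scattering the first k characters, expressed pointwise (B's shape).
def gcell (l : List Char) (k m i j : Nat) : Int :=
  if m * 16 + j * 4 + i < k then ((l.getD (m * 16 + j * 4 + i) ' ').toNat : Int) else 32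

def gmat (l : List Char) (k m : Nat) : List (List Int) :=
  (List.range 4).map (fun i => (List.range 4).map (gcell l k m i))

def gather (l : List Char) (k : Nat) : List (List (List Int)) :=
  (List.range ((k + 15) / 16)).map (gmat l k)

lemma getD_map_range {α : Type} (n a : Nat) (f : Nat → α) (d : α) (h : a < n) :
    ((List.range n).map f).getD a d = f a := by
  simp [List.getD, h]

lemma set_map_range {α : Type} (n a : Nat) (f g : Nat → α) (h : a < n)
    (hg : ∀ x, x < n → x ≠ a → g x = f x) :
    ((List.range n).map f).set a (g a) = (List.range n).map g := by
  apply List.ext_getElem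
  · simp
  · intro i h1 h2
    simp only [List.getElem_set, List.getElem_map, List.getElem_range] at *
    simp only [List.length_set, List.length_map, List.length_range] at h1
    by_cases hi : i = a
    · simp [hi]
    · simp [hi, hg i h1 hi]
      intro hai; exact absurd hai.symm hi

lemma gcell_stable (l : List Char) (k m i j : Nat) (hi : i < 4) (hj : j < 4)
    (hne : m * 16 + j * 4 + i ≠ k) : gcell l (k + 1) m i j = gcell l k m i j := by
  unfold gcell
  split_ifs with h1 h2 h2 <;> first | rfl | omega

lemma gmat_stable (l : List Char) (k m : Nat) (hne : m ≠ k / 16) :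
    gmat l (k + 1) m = gmat l k m := by
  unfold gmat
  apply List.map_congr_left; intro i hi
  apply List.map_congr_left; intro j hj
  simp only [List.mem_range] at hi hj
  exact gcell_stable l k m i j hi hj (by omega)

lemma set_gather (l : List Char) (k : Nat) (hk : k < l.length) (N : Nat) (hN : N = (k + 16) / 16) :
    ((List.range N).map (gmat l k)).set (k / 16)
      ((((List.range N).map (gmat l k)).getD (k / 16) []).set (k % 16 % 4)
        ((((((List.range N).map (gmat l k)).getD (k / 16) []).getD (k % 16 % 4) [])).set (k % 16 / 4)
          ((l[k].toNat : Int))))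
    = gather l (k + 1) := by
  have hq : k / 16 < N := by omega
  rw [getD_map_range _ _ _ _ hq]
  have hrow : (gmat l k (k / 16)).getD (k % 16 % 4) [] =
      (List.range 4).map (gcell l k (k / 16) (k % 16 % 4)) := by
    unfold gmat; exact getD_map_range _ _ _ _ (by omega)
  rw [hrow]
  have hord : ((l[k].toNat : Int)) = gcell l (k + 1) (k / 16) (k % 16 % 4) (k % 16 / 4) := by
    unfold gcell
    rw [if_pos (by omega)]
    have hidx : k / 16 * 16 + k % 16 / 4 * 4 + k % 16 % 4 = k := by omega
    rw [hidx]
    congr 1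
    simp [List.getD, List.getElem?_eq_getElem hk]
  rw [hord,
    set_map_range 4 (k % 16 / 4) (gcell l k (k / 16) (k % 16 % 4))
      (gcell l (k + 1) (k / 16) (k % 16 % 4)) (by omega)
      (fun j hj hne => gcell_stable l k _ _ j (by omega) hj (by omega))]
  have hmid := set_map_range 4 (k % 16 % 4)
      (fun i => (List.range 4).map (gcell l k (k / 16) i))
      (fun i => (List.range 4).map (gcell l (k + 1) (k / 16) i)) (by omega)
      (by
        intro i hi hne
        apply List.map_congr_left; intro j hj
        simp only [List.mem_range] at hj
        exact gcell_stable l k _ i j hi hj (by omega))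
  rw [show gmat l k (k / 16) = (List.range 4).map
        (fun i => (List.range 4).map (gcell l k (k / 16) i)) from rfl, hmid]
  have htop := set_map_range N (k / 16) (gmat l k) (gmat l (k + 1)) hq
      (fun m hm hne => gmat_stable l k m hne)
  rw [show (List.range 4).map (fun i => (List.range 4).map (gcell l (k + 1) (k / 16) i)) =
      gmat l (k + 1) (k / 16) from rfl, htop]
  unfold gather
  have hNN : (k + 1 + 15) / 16 = N := by omega
  rw [hNN]

lemma cmtmStep_gather (l : List Char) (k : Nat) (hk : k < l.length) :
    cmtmStep (gather l k) ((k : Int), l[k]) = gather l (k + 1) := by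
  unfold cmtmStep
  have hfd : PySem.Int.floordiv (k : Int) 16 = ((k / 16 : Nat) : Int) := by
    exact_mod_cast PySem.Int.floordiv_natCast k 16
  have hmd : PySem.Int.mod (k : Int) 16 = ((k % 16 : Nat) : Int) := by
    exact_mod_cast PySem.Int.mod_natCast k 16
  have hfd4 : PySem.Int.floordiv ((k % 16 : Nat) : Int) 4 = ((k % 16 / 4 : Nat) : Int) := by
    exact_mod_cast PySem.Int.floordiv_natCast (k % 16) 4
  have hmd4 : PySem.Int.mod ((k % 16 : Nat) : Int) 4 = ((k % 16 % 4 : Nat) : Int) := by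
    exact_mod_cast PySem.Int.mod_natCast (k % 16) 4
  simp only [hfd, hmd, hfd4, hmd4, PySem.List.pySetD_natCast, PySem.List.pyGetD_natCast]
  by_cases hp : k % 16 = 0
  · have hbeq : (((k % 16 : Nat) : Int) == 0) = true := by simp [hp]
    rw [hbeq, if_pos rfl]
    have hgm : gmat l k (k / 16) =
        (List.range 4).map (fun _ => (List.range 4).map (fun _ => (32 : Int))) := by
      unfold gmat
      apply List.map_congr_left; intro i hi
      apply List.map_congr_left; intro j hj
      simp only [List.mem_range] at hi hj
      unfold gcell
      rw [if_neg (by omega)]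
    have hfresh : (PySem.List.pyRange 0 4 1).map
        (fun _ => (PySem.List.pyRange 0 4 1).map (fun _ => (32 : Int))) = gmat l k (k / 16) := by
      rw [hgm]; decide
    have happ : gather l k ++ [gmat l k (k / 16)] =
        (List.range (k / 16 + 1)).map (gmat l k) := by
      unfold gather
      rw [show (k + 15) / 16 = k / 16 from by omega, List.range_succ, List.map_append]
      simp
    rw [hfresh, happ]
    exact set_gather l k hk (k / 16 + 1) (by omega)
  · have hbeq : (((k % 16 : Nat) : Int) == 0) = false := by simp; omega
    rw [hbeq, if_neg (by simp)]
    have : gather l k = (List.range ((k + 15) / 16)).map (gmat l k) := rfl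
    rw [this]
    exact set_gather l k hk ((k + 15) / 16) (by omega)

lemma foldl_gather (t : List Char) : ∀ (l : List Char) (k : Nat), k ≤ l.length → l.drop k = t →
    (PySem.List.enumerate t (k : Int)).foldl cmtmStep (gather l k) = gather l l.length := by
  induction t with
  | nil =>
    intro l k hk hd
    have : k = l.length := by
      have := List.drop_eq_nil_iff.mp hd; omega
    simp [PySem.List.enumerate, this]
  | cons c t ih =>
    intro l k hk hd
    have hlt : k < l.length := by
      by_contra h
      rw [List.drop_eq_nil_iff.mpr (by omega)] at hd; simp at hd
    have hc : l[k] = c := by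
      have h2 := congrArg (fun (xs : List Char) => xs[0]?) hd
      simp only [List.getElem?_drop, Nat.add_zero, List.getElem?_cons_zero] at h2
      rw [List.getElem?_eq_getElem hlt] at h2
      exact Option.some.inj h2
    have hstep := cmtmStep_gather l k hlt
    rw [hc] at hstep
    rw [PySem.List.enumerate_cons, List.foldl_cons, hstep]
    have : ((k : Int) + 1) = ((k + 1 : Nat) : Int) := by push_cast; ring
    rw [this]
    exact ih l (k + 1) hlt (by rw [← List.drop_drop, hd]; simp)

lemma alt_eq_gather (message : String) :
    convert_message_to_matrix_alt message = gather message.toList message.toList.length := by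
  unfold convert_message_to_matrix_alt gather gmat gcell
  apply List.map_congr_left; intro m hm
  apply List.map_congr_left; intro i hi
  apply List.map_congr_left; intro j hj
  split
  · next h => simp [List.getD, List.getElem?_eq_getElem h]
  · rfl

-- ===== VERDICT (by name: the statement is the Claim_ definition above) =====
theorem convert_message_to_matrix_spec : Claim_equal_convert_message_to_matrix := by
  intro message _
  unfold Spec_convert_message_to_matrix convert_message_to_matrix
  have h := foldl_gather message.toList message.toList 0 (by omega) (by simp)
  rw [show gather message.toList 0 = [] from by simp [gather]] at h
  rw [alt_eq_gather, ← h]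
  norm_num
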